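-- pv_equiv track=rewrite | github.com/KhouloudSassiKs/optimisations-complexity-python | minHeap-operations.py | solution
-- ===== SOURCE A (Python) =====
-- import heapq
--
-- def solution(operations):
--     """
--     Implements a max-heap that supports three operations:
--     - "Add": insert a number
--     - "Max": record the current maximum value
--     - "RemoveMax": remove the current maximum value
--
--     Args:
--         operations (list[tuple[str, int]]): List of operations, each represented as (operation, number).
--             Example: [("Add", 5), ("Max", 0), ("RemoveMax", 0)]
--
--     Returns:
--         list[int]: A list of maximum values recorded during "Max" operations.
--     """
--     my_heap = []       # Python heapq is a min-heap, so we push negative values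
--     maximum_values = []  # Stores results of "Max" operations
--
--     for op, number in operations:
--         if op == "Add":
--             heapq.heappush(my_heap, -number)  # negate for max-heap behavior
--         elif op == "Max" and my_heap:
--             maximum_values.append(-my_heap[0])  # peek the max
--         elif op == "RemoveMax" and my_heap:
--             heapq.heappop(my_heap)  # remove the max element
--
--     return maximum_values
-- ===== SOURCE B (Python) =====
-- def solution(operations):
--     nums = []
--     result = []
--     for op, number in operations:
--         if op == "Add":
--             nums.append(number)
--         elif op == "Max" and nums:
--             result.append(max(nums))
--         elif op == "RemoveMax" and nums:
--             nums.remove(max(nums))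
--     return result
-- ===== Notes on version B (the rewrite author's own statement) =====
-- stated objective: simpler
-- what changed: Replaces the negated min-heap (heapq with sign flipping) by a plain list scanned with max() on demand: Add appends, Max appends max(nums), RemoveMax removes one occurrence of max(nums); no heap maintenance and no negation.
import Mathlib
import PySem

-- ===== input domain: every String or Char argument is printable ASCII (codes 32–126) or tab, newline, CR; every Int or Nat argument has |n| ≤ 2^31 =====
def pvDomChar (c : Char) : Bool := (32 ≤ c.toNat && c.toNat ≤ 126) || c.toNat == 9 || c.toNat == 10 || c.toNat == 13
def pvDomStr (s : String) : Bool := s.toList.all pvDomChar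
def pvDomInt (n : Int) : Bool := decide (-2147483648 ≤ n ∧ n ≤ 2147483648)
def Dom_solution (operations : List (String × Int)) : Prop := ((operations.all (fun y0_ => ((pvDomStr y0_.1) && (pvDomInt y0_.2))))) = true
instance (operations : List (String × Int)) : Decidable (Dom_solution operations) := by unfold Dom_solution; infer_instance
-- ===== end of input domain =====

-- B replaces A's negated heapq min-heap by a plain list scanned with max() on demand (simpler, no negation); same results.


-- ===== PORT A =====
-- heapq calls ported by their contract on the stored multiset: heappush inserts,
-- heap[0] is the minimum element, heappop removes one occurrence of the minimum.
def pyHeappush (heap : List Int) (x : Int) : List Int := heap ++ [x]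
def pyHeapTop? (heap : List Int) : Option Int := heap.min?
def pyHeappop (heap : List Int) : List Int :=
  match heap.min? with
  | some m => heap.erase m
  | none => heap

def solutionStep (st : List Int × List Int) (p : String × Int) : List Int × List Int :=
  if p.1 == "Add" then (pyHeappush st.1 (-p.2), st.2)
  else if p.1 == "Max" && !st.1.isEmpty then (st.1, st.2 ++ [-((pyHeapTop? st.1).getD 0)])
  else if p.1 == "RemoveMax" && !st.1.isEmpty then (pyHeappop st.1, st.2)
  else st

def solution (operations : List (String × Int)) : List Int :=
  (operations.foldl solutionStep (([] : List Int), ([] : List Int))).2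

-- ===== PORT B =====
def solnAltGo : List (String × Int) → List Int → List Int → List Int
  | [], _, result => result
  | (op, number) :: rest, nums, result =>
    if op == "Add" then solnAltGo rest (nums ++ [number]) result
    else if op == "Max" && !nums.isEmpty then
      solnAltGo rest nums (result ++ [nums.max?.getD 0])
    else if op == "RemoveMax" && !nums.isEmpty then
      solnAltGo rest (nums.erase (nums.max?.getD 0)) result
    else solnAltGo rest nums result

def solution_alt (operations : List (String × Int)) : List Int :=
  solnAltGo operations [] []

-- ===== PRECONDITION & SPEC =====
def Spec_solution (operations : List (String × Int)) (out : List Int) : Prop := out = solution_alt operations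
instance (operations : List (String × Int)) (out : List Int) : Decidable (Spec_solution operations out) := by unfold Spec_solution; infer_instance

-- ===== CLAIM (what is proved, stated in full; the proofs are below) =====
def Claim_equal_solution : Prop := ∀ (operations : List (String × Int)), Dom_solution operations → Spec_solution operations (solution operations)

-- ===== LEMMAS AND PROOFS =====

theorem foldl_min_map_neg (l : List Int) : ∀ a : Int,
    (l.map (fun x => -x)).foldl min (-a) = -(l.foldl max a) := by
  induction l with
  | nil => intro a; simp
  | cons b t ih =>
      intro a
      simp only [List.map_cons, List.foldl_cons]
      have hmm : min (-a) (-b) = -(max a b) := by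
        rcases le_total a b with h | h
        · rw [max_eq_right h, min_eq_right (by omega)]
        · rw [max_eq_left h, min_eq_left (by omega)]
      rw [hmm]
      exact ih (max a b)

theorem min?_map_neg (l : List Int) :
    (l.map (fun x => -x)).min? = l.max?.map (fun x => -x) := by
  cases l with
  | nil => simp
  | cons a t =>
      simp only [List.map_cons, List.min?_cons', List.max?_cons', Option.map_some]
      exact congrArg some (foldl_min_map_neg t a)

theorem neg_injective_int : Function.Injective (fun x : Int => -x) := by
  intro a b h; dsimp at h; omega

theorem solution_inv (ops : List (String × Int)) : ∀ (nums res : List Int),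
    (ops.foldl solutionStep (nums.map (fun x => -x), res)).2 = solnAltGo ops nums res := by
  induction ops with
  | nil => intro nums res; simp [solnAltGo]
  | cons p rest ih =>
      intro nums res
      obtain ⟨op, n⟩ := p
      simp only [List.foldl_cons, solutionStep, solnAltGo]
      by_cases hAdd : op == "Add"
      · simp only [hAdd, if_true]
        have : pyHeappush (nums.map (fun x => -x)) (-n) = (nums ++ [n]).map (fun x => -x) := by
          simp [pyHeappush]
        rw [this, ih]
      · simp only [hAdd, if_false, Bool.false_eq_true]
        by_cases hne : nums.isEmpty
        · -- empty list: guards on both sides are false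
          have hA : ((nums.map (fun x => -x)).isEmpty) = true := by simp [hne]
          by_cases hMax : op == "Max" <;> by_cases hRem : op == "RemoveMax" <;>
            simp [hMax, hRem, hA, hne, ih]
        · have hnb : nums.isEmpty = false := Bool.not_eq_true _ |>.mp hne
          have hA : ((nums.map (fun x => -x)).isEmpty) = false := by
            simp only [List.isEmpty_map]; exact hnb
          obtain ⟨M, hM⟩ : ∃ M, nums.max? = some M := by
            cases nums with
            | nil => simp at hne
            | cons a t => exact ⟨_, List.max?_cons' ..⟩
          have hmin : (nums.map (fun x => -x)).min? = some (-M) := by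
            rw [min?_map_neg, hM]; rfl
          by_cases hMax : op == "Max"
          · simp only [hMax, hA, Bool.true_and, Bool.not_false, if_true,
              pyHeapTop?, hmin, hM, Option.getD_some]
            rw [show -(-M) = M by omega]
            simp [hnb, ih]
          · simp only [hMax, Bool.false_and, Bool.false_eq_true, if_false, hA, Bool.not_false]
            by_cases hRem : op == "RemoveMax"
            · simp only [hRem, Bool.true_and, if_true, pyHeappop, hmin, hM, Option.getD_some]
              have : (nums.map (fun x => -x)).erase (-M) = (nums.erase M).map (fun x => -x) := by
                rw [List.map_erase neg_injective_int]
              simp [this, hnb, ih]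
            · simp only [hRem, Bool.false_and, Bool.false_eq_true, if_false]
              exact ih nums res

-- ===== VERDICT (by name: the statement is the Claim_ definition above) =====
theorem solution_spec : Claim_equal_solution := by
  intro operations _
  unfold Spec_solution solution solution_alt
  have := solution_inv operations [] []
  simpa using this
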